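-- pv_equiv track=rewrite | github.com/ini/numthy | solve.py | problem_30
-- ===== SOURCE A (Python) =====
-- import string
-- from itertools import combinations, combinations_with_replacement, islice, permutations
--
-- def problem_30(n=5):
--     """
--     Find the sum of all numbers (>= 2 digits) that can be written as the sum of the
--     n-th powers of their digits.
--
--     Notes
--     -----
--     A k-digit number is at least 10^(k-1), and the sum of n-th powers of
--     a k-digit number is at most k * 9^n. This means we can upper bound the
--     number of digits by the largest k satisfying 10^(k-1) <= k * 9^n.
--
--     Notice that there are at most ((10 + k - 1) choose k) unique digit power sums,
--     as the order of the digits doesn't matter.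
--     """
--     digit_powers = {str(d): d**n for d in range(10)}
--     digit_power_sum = lambda digits: sum(map(digit_powers.__getitem__, digits))
--
--     # Find upper bound on number of digits
--     k = 2
--     while 10**k <= (k + 1) * 9**n:
--         k += 1
--
--     # Find numbers that satisfy the condition
--     values = set()
--     for digits in combinations_with_replacement(string.digits, k):
--         a = digit_power_sum(digits)
--         b = digit_power_sum(str(a))
--         if a == b and a >= 10:
--             values.add(a)
--
--     return sum(values)
-- ===== SOURCE B (Python) =====
-- def problem_30(n=5):
--     """
--     Sum of all numbers (>= 2 digits) equal to the sum of the n-th powers of their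
--     digits.  Dynamic program: k rounds of sorted-merge set addition build the sorted
--     duplicate-free list of all sums of k digit n-th powers; candidates are checked
--     with an arithmetic digit loop.
--     """
--     powers = [d ** n for d in range(10)]
--     k = 2
--     while 10 ** k <= (k + 1) * 9 ** n:
--         k += 1
--     def merge(xs, ys):
--         out = []
--         i = j = 0
--         lx, ly = len(xs), len(ys)
--         while i < lx and j < ly:
--             a, b = xs[i], ys[j]
--             if a < b:
--                 out.append(a); i += 1
--             elif b < a:
--                 out.append(b); j += 1
--             else:
--                 out.append(a); i += 1; j += 1
--         out.extend(xs[i:]); out.extend(ys[j:])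
--         return out
--     sums = [0]
--     for _ in range(k):
--         new = []
--         for p in powers:
--             new = merge(new, [s + p for s in sums])
--         sums = new
--     def dps(m):
--         t = 0
--         while m:
--             t += (m % 10) ** n
--             m //= 10
--         return t
--     return sum(a for a in sums if a >= 10 and a == dps(a))
-- ===== Notes on version B (the rewrite author's own statement) =====
-- stated objective: alternative
-- what changed: Replaces the enumeration of digit multisets (itertools.combinations_with_replacement plus dict-keyed digit lookups) by a dynamic program: k rounds of sorted-merge set addition build the sorted duplicate-free list of all sums of k digit n-th powers, and candidates are verified with an arithmetic divmod digit loop instead of str()/dict indexing.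
import Mathlib
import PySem

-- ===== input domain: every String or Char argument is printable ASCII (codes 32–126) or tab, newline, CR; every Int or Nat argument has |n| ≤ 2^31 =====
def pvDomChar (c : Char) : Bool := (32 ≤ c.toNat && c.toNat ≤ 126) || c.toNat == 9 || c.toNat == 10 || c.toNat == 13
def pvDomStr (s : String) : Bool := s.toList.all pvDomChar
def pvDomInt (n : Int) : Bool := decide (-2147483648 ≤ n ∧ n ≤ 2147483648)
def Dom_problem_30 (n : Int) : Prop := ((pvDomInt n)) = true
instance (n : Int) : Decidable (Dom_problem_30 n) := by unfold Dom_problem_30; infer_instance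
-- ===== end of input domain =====

-- B replaces the enumeration of digit multisets (combinations_with_replacement) by a
-- dynamic program: k iterated sorted-merge set additions building the sorted list of
-- achievable digit-power sums, checked with an arithmetic digit loop instead of
-- string/dict lookups (alternative algorithm of similar cost).

-- ===== PORT A =====

-- d ** n : exact for 0 ≤ n (Pre_); for negative n Python raises or returns a float
def pvPow (d n : Int) : Int := d ^ n.toNat

-- digit_powers = {str(d): d**n for d in range(10)}
def pvDigitPowers (n : Int) : PySem.Dict String Int :=
  (PySem.List.pyRange 0 10 1).foldl
    (fun dct d => dct.insert (PySem.Int.toStr d) (pvPow d n)) PySem.Dict.empty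

-- digit_power_sum = lambda digits: sum(map(digit_powers.__getitem__, digits)); the
-- lambda captures the dict built once, so the dict is a parameter here;
-- every key looked up is a digit character and is present, so getD 0 is exact here
def pvDigitPowerSum (dp : PySem.Dict String Int) (digits : List String) : Int :=
  (digits.map (fun s => dp.getD s 0)).sum

-- iterating a Python string yields its characters as 1-character strings
def pvStrChars (s : String) : List String := s.toList.map (fun c => String.ofList [c])

-- 'k = 2; while 10**k <= (k+1)*9**n: k += 1' — this exact loop appears verbatim in both
-- A and B, so both ports call this helper.  The fuel n.toNat+40 can never run out inside
-- Dom: the loop exits before k reaches n.toNat+14 (10^(t+12) > (t+13)*9^t for t ≤ 2^31).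
def pvFindKAux (nine : Int) : Nat → Nat → Nat
  | 0, k => k
  | fuel+1, k => if (10:Int) ^ k ≤ ((k:Int) + 1) * nine then pvFindKAux nine fuel (k+1) else k

def pvFindK (n : Int) : Nat := pvFindKAux (pvPow 9 n) (n.toNat + 40) 2

-- string.digits, as the 1-character strings its iteration yields
def pvPool : List String := ["0","1","2","3","4","5","6","7","8","9"]

-- itertools.combinations_with_replacement(pool, k), in CPython's order
def pvCWR : List String → Nat → List (List String)
  | _, 0 => [[]]
  | [], _+1 => []
  | p :: rest, k+1 => ((pvCWR (p :: rest) k).map (p :: ·)) ++ pvCWR rest (k+1)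
termination_by pool k => pool.length + k

def problem_30 (n : Int) : Int :=
  let digitPowers := pvDigitPowers n
  let k := pvFindK n
  let values : PySem.Set Int :=
    (pvCWR pvPool k).foldl
      (fun vs digits =>
        let a := pvDigitPowerSum digitPowers digits
        let b := pvDigitPowerSum digitPowers (pvStrChars (PySem.Int.toStr a))
        if a = b ∧ 10 ≤ a then PySem.Set.add vs a else vs)
      PySem.Set.empty
  values.sum    -- sum(values): order-independent consumption of the set

-- ===== PORT B =====

-- powers = [d**n for d in range(10)]
def pvAltPowers (n : Int) : List Int :=
  (PySem.List.pyRange 0 10 1).map (fun d => d ^ n.toNat)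

-- t = 0; while m: t += (m % 10)**n; m //= 10   (only ever called on m ≥ 0, encoded as Nat)
def pvAltDigitPowerSum (n : Int) (m : Nat) : Int :=
  if _h : m = 0 then 0 else ((m % 10 : Nat) : Int) ^ n.toNat + pvAltDigitPowerSum n (m / 10)
decreasing_by exact Nat.div_lt_self (Nat.pos_of_ne_zero _h) (by norm_num)

-- the two-pointer while-loop of merge(xs, ys): out is the accumulator list
-- (Python appends at the right; here out is kept reversed and restored at the end)
def pvMergeLoop : List Int → List Int → List Int → List Int
  | out, [], ys => out.reverse ++ ys
  | out, xs, [] => out.reverse ++ xs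
  | out, x :: xs, y :: ys =>
      if x < y then pvMergeLoop (x :: out) xs (y :: ys)
      else if y < x then pvMergeLoop (y :: out) (x :: xs) ys
      else pvMergeLoop (x :: out) xs ys
termination_by _ xs ys => xs.length + ys.length

-- merge(xs, ys): merge two sorted duplicate-free lists, dropping common duplicates
def pvMerge (xs ys : List Int) : List Int := pvMergeLoop [] xs ys

def problem_30_alt (n : Int) : Int :=
  let k := pvFindK n    -- Source B contains the same 'while 10**k <= (k+1)*9**n' loop
  -- for _ in range(k): new = []; for p in powers: new = merge(new, [s+p for s in sums])
  let sums : List Int :=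
    (List.range k).foldl
      (fun sums _ =>
        (pvAltPowers n).foldl (fun new p => pvMerge new (sums.map (fun s => s + p))) [])
      [0]
  -- sum(a for a in sums if a >= 10 and a == dps(a))
  sums.foldl (fun t a => if 10 ≤ a ∧ a = pvAltDigitPowerSum n a.toNat then t + a else t) 0

-- ===== PRECONDITION & SPEC =====

-- Pre_ excludes negative n, on which Python A raises ZeroDivisionError (zero digit
-- raised to a negative power; the other powers are floats, not ints); B raises there identically.
def Pre_problem_30 (n : Int) : Prop := 0 ≤ n
instance (n : Int) : Decidable (Pre_problem_30 n) := by unfold Pre_problem_30; infer_instance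

def pvWitness_problem_30 : Int := (3)

def Spec_problem_30 (n : Int) (out : Int) : Prop := out = problem_30_alt n
instance (n : Int) (out : Int) : Decidable (Spec_problem_30 n out) := by unfold Spec_problem_30; infer_instance

-- ===== CLAIM (what is proved, stated in full; the proofs are below) =====
def Claim_equal_problem_30 : Prop := ∀ (n : Int), Dom_problem_30 n → Pre_problem_30 n → Spec_problem_30 n (problem_30 n)

-- ===== LEMMAS AND PROOFS =====

-- digits 0..9 as Ints, and paired with their string forms
def pvDigitsI : List Int := [0,1,2,3,4,5,6,7,8,9]
def pvPairs : List (String × Int) :=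
  [("0",0),("1",1),("2",2),("3",3),("4",4),("5",5),("6",6),("7",7),("8",8),("9",9)]

-- sums reachable as k digit n-th powers
def pvReach (n : Int) : Nat → Int → Prop
  | 0, s => s = 0
  | k+1, s => ∃ t, pvReach n k t ∧ ∃ d ∈ pvDigitsI, s = t + pvPow d n

lemma pvGetDDigit (n : Int) (s : String) (d : Int) (hs : (s, d) ∈ pvPairs) :
    (pvDigitPowers n).getD s 0 = pvPow d n := by
  have h : PySem.List.pyRange 0 10 1 = [0,1,2,3,4,5,6,7,8,9] := by decide
  have e0 : PySem.Int.toStr 0 = "0" := by rfl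
  have e1 : PySem.Int.toStr 1 = "1" := by rfl
  have e2 : PySem.Int.toStr 2 = "2" := by rfl
  have e3 : PySem.Int.toStr 3 = "3" := by rfl
  have e4 : PySem.Int.toStr 4 = "4" := by rfl
  have e5 : PySem.Int.toStr 5 = "5" := by rfl
  have e6 : PySem.Int.toStr 6 = "6" := by rfl
  have e7 : PySem.Int.toStr 7 = "7" := by rfl
  have e8 : PySem.Int.toStr 8 = "8" := by rfl
  have e9 : PySem.Int.toStr 9 = "9" := by rfl
  unfold pvDigitPowers
  rw [h]
  simp only [List.foldl, e0,e1,e2,e3,e4,e5,e6,e7,e8,e9]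
  fin_cases hs <;> simp [PySem.Dict.getD_insert]

lemma pv_lookup_digitChar (n : Int) (d : Nat) (hd : d < 10) :
    (pvDigitPowers n).getD (String.ofList [Nat.digitChar d]) 0 = pvPow (d : Int) n := by
  interval_cases d <;>
    · norm_num
      exact pvGetDDigit n _ _ (by decide)

lemma pv_pool_val (n : Int) (s : String) (hs : s ∈ pvPool) :
    ∃ d ∈ pvDigitsI, (pvDigitPowers n).getD s 0 = pvPow d n := by
  fin_cases hs
  · exact ⟨0, by decide, pvGetDDigit n _ _ (by decide)⟩
  · exact ⟨1, by decide, pvGetDDigit n _ _ (by decide)⟩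
  · exact ⟨2, by decide, pvGetDDigit n _ _ (by decide)⟩
  · exact ⟨3, by decide, pvGetDDigit n _ _ (by decide)⟩
  · exact ⟨4, by decide, pvGetDDigit n _ _ (by decide)⟩
  · exact ⟨5, by decide, pvGetDDigit n _ _ (by decide)⟩
  · exact ⟨6, by decide, pvGetDDigit n _ _ (by decide)⟩
  · exact ⟨7, by decide, pvGetDDigit n _ _ (by decide)⟩
  · exact ⟨8, by decide, pvGetDDigit n _ _ (by decide)⟩
  · exact ⟨9, by decide, pvGetDDigit n _ _ (by decide)⟩

lemma pvCWR_mem_shape (pool : List String) (k : Nat) :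
    ∀ L ∈ pvCWR pool k, L.length = k ∧ ∀ x ∈ L, x ∈ pool := by
  induction pool, k using pvCWR.induct with
  | case1 pool => intro L hL; simp [pvCWR] at hL; simp [hL]
  | case2 k => intro L hL; simp [pvCWR] at hL
  | case3 p rest k ih1 ih2 =>
    intro L hL
    rw [pvCWR] at hL
    rcases List.mem_append.1 hL with h | h
    · obtain ⟨M, hM, rfl⟩ := List.mem_map.1 h
      obtain ⟨hlen, hmem⟩ := ih1 M hM
      refine ⟨by simp [hlen], ?_⟩
      intro x hx
      rcases List.mem_cons.1 hx with rfl | hx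
      · exact List.mem_cons_self
      · exact hmem x hx
    · obtain ⟨hlen, hmem⟩ := ih2 L h
      exact ⟨hlen, fun x hx => List.mem_cons_of_mem _ (hmem x hx)⟩

lemma pvCWR_mem_mono (q : String) (pool : List String) (k : Nat) (M : List String)
    (h : M ∈ pvCWR pool k) : M ∈ pvCWR (q :: pool) k := by
  cases k with
  | zero => simpa [pvCWR] using h
  | succ k =>
    rw [pvCWR]
    exact List.mem_append.2 (Or.inr h)

lemma pvCWR_rep (q : String) (pool : List String) :
    ∀ (c m : Nat) (M : List String), M ∈ pvCWR pool m →
      List.replicate c q ++ M ∈ pvCWR (q :: pool) (c + m) := by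
  intro c
  induction c with
  | zero => intro m M h; simpa using pvCWR_mem_mono q pool m M h
  | succ c ih =>
    intro m M h
    have h' := ih m M h
    have : List.replicate (c+1) q ++ M = q :: (List.replicate c q ++ M) := by
      simp [List.replicate_succ]
    rw [this]
    have hk : c + 1 + m = (c + m) + 1 := by omega
    rw [hk, pvCWR]
    exact List.mem_append.2 (Or.inl (List.mem_map.2 ⟨_, h', rfl⟩))

-- A-side fold over the combinations: membership and nodup
lemma pv_mem_foldl_if {β : Type} (l : List β) (C : β → Prop) [DecidablePred C]
    (f : β → Int) :
    ∀ (s : PySem.Set Int) (y : Int),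
      y ∈ l.foldl (fun vs t => if C t then PySem.Set.add vs (f t) else vs) s ↔
        y ∈ s ∨ ∃ t ∈ l, C t ∧ y = f t := by
  induction l with
  | nil => intro s y; simp
  | cons t l ih =>
    intro s y
    simp only [List.foldl]
    by_cases hC : C t
    · rw [if_pos hC, ih, PySem.Set.mem_add]
      constructor
      · rintro ((h | rfl) | ⟨u, hu, hCu, rfl⟩)
        · exact Or.inl h
        · exact Or.inr ⟨t, by simp, hC, rfl⟩
        · exact Or.inr ⟨u, by simp [hu], hCu, rfl⟩
      · rintro (h | ⟨u, hu, hCu, rfl⟩)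
        · exact Or.inl (Or.inl h)
        · rcases List.mem_cons.1 hu with rfl | hu
          · exact Or.inl (Or.inr rfl)
          · exact Or.inr ⟨u, hu, hCu, rfl⟩
    · rw [if_neg hC, ih]
      constructor
      · rintro (h | ⟨u, hu, hCu, rfl⟩)
        · exact Or.inl h
        · exact Or.inr ⟨u, by simp [hu], hCu, rfl⟩
      · rintro (h | ⟨u, hu, hCu, rfl⟩)
        · exact Or.inl h
        · rcases List.mem_cons.1 hu with rfl | hu
          · exact absurd hCu hC
          · exact Or.inr ⟨u, hu, hCu, rfl⟩

lemma pv_nodup_foldl_if {β : Type} (l : List β) (C : β → Prop) [DecidablePred C]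
    (f : β → Int) :
    ∀ (s : PySem.Set Int), s.Nodup →
      (l.foldl (fun vs t => if C t then PySem.Set.add vs (f t) else vs) s).Nodup := by
  induction l with
  | nil => intro s hs; simpa using hs
  | cons t l ih =>
    intro s hs
    simp only [List.foldl]
    by_cases hC : C t
    · rw [if_pos hC]; exact ih _ (PySem.Set.nodup_add _ _ hs)
    · rw [if_neg hC]; exact ih _ hs

lemma pv_mergeLoop_mem (z : Int) :
    ∀ (out xs ys : List Int),
      z ∈ pvMergeLoop out xs ys ↔ z ∈ out ∨ z ∈ xs ∨ z ∈ ys := by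
  intro out xs ys
  induction out, xs, ys using pvMergeLoop.induct with
  | case1 out ys => simp [pvMergeLoop]
  | case2 out xs _h => cases xs with
    | nil => simp [pvMergeLoop]
    | cons x xs => simp [pvMergeLoop]
  | case3 out x xs y ys hxy ih =>
    rw [pvMergeLoop, if_pos hxy, ih]
    simp
    tauto
  | case4 out x xs y ys hxy hyx ih =>
    rw [pvMergeLoop, if_neg hxy, if_pos hyx, ih]
    simp
    tauto
  | case5 out x xs y ys hxy hyx ih =>
    have heq : x = y := by omega
    subst heq
    rw [pvMergeLoop, if_neg hxy, if_neg hyx, ih]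
    simp
    tauto

lemma pv_mergeLoop_pairwise :
    ∀ (out xs ys : List Int),
      (out.reverse ++ xs).Pairwise (· < ·) → (out.reverse ++ ys).Pairwise (· < ·) →
      (pvMergeLoop out xs ys).Pairwise (· < ·) := by
  intro out xs ys
  induction out, xs, ys using pvMergeLoop.induct with
  | case1 out ys => intro _ h2; simpa [pvMergeLoop] using h2
  | case2 out xs h => intro h1 _; cases xs with
    | nil => simpa [pvMergeLoop] using h1
    | cons x xs => simpa [pvMergeLoop] using h1
  | case3 out x xs y ys hxy ih =>
    intro h1 h2
    rw [pvMergeLoop, if_pos hxy]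
    apply ih
    · simpa using h1
    · rw [List.reverse_cons, List.append_assoc]
      rw [List.pairwise_append] at h1 h2 ⊢
      obtain ⟨ho, hxxs, hbound1⟩ := h1
      obtain ⟨-, hyys, hbound2⟩ := h2
      rw [List.pairwise_cons] at hxxs hyys
      refine ⟨ho, ?_, ?_⟩
      · rw [List.singleton_append, List.pairwise_cons]
        constructor
        · rintro z hz
          rcases List.mem_cons.1 hz with rfl | hz
          · exact hxy
          · exact lt_trans hxy (hyys.1 z hz)
        · rw [List.pairwise_cons]
          exact hyys
      · intro a ha b hb
        simp only [List.singleton_append, List.mem_cons] at hb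
        rcases hb with rfl | rfl | hb
        · exact hbound1 a ha _ (by simp)
        · exact hbound2 a ha _ (by simp)
        · exact hbound2 a ha b (by simp [hb])
  | case4 out x xs y ys hxy hyx ih =>
    intro h1 h2
    rw [pvMergeLoop, if_neg hxy, if_pos hyx]
    apply ih
    · rw [List.reverse_cons, List.append_assoc]
      rw [List.pairwise_append] at h1 h2 ⊢
      obtain ⟨ho, hxxs, hbound1⟩ := h1
      obtain ⟨-, hyys, hbound2⟩ := h2
      rw [List.pairwise_cons] at hxxs hyys
      refine ⟨ho, ?_, ?_⟩
      · rw [List.singleton_append, List.pairwise_cons]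
        constructor
        · rintro z hz
          rcases List.mem_cons.1 hz with rfl | hz
          · exact hyx
          · exact lt_trans hyx (hxxs.1 z hz)
        · rw [List.pairwise_cons]
          exact hxxs
      · intro a ha b hb
        simp only [List.singleton_append, List.mem_cons] at hb
        rcases hb with rfl | rfl | hb
        · exact hbound2 a ha _ (by simp)
        · exact hbound1 a ha _ (by simp)
        · exact hbound1 a ha b (by simp [hb])
    · simpa using h2
  | case5 out x xs y ys hxy hyx ih =>
    intro h1 h2
    have heq : x = y := by omega
    subst heq
    rw [pvMergeLoop, if_neg hxy, if_neg hyx]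
    apply ih
    · simpa using h1
    · rw [List.reverse_cons, List.append_assoc]
      rw [List.pairwise_append] at h2 ⊢
      obtain ⟨ho, hyys, hbound2⟩ := h2
      rw [List.pairwise_cons] at hyys
      refine ⟨ho, ?_, ?_⟩
      · rw [List.singleton_append, List.pairwise_cons]
        exact hyys
      · intro a ha b hb
        simp only [List.singleton_append, List.mem_cons] at hb
        rcases hb with rfl | hb
        · exact hbound2 a ha b (by simp)
        · exact hbound2 a ha b (by simp [hb])

lemma pv_merge_mem (z : Int) (xs ys : List Int) :
    z ∈ pvMerge xs ys ↔ z ∈ xs ∨ z ∈ ys := by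
  unfold pvMerge
  rw [pv_mergeLoop_mem]
  simp

lemma pv_merge_pairwise (xs ys : List Int) (hx : xs.Pairwise (· < ·))
    (hy : ys.Pairwise (· < ·)) : (pvMerge xs ys).Pairwise (· < ·) := by
  unfold pvMerge
  exact pv_mergeLoop_pairwise [] xs ys (by simpa using hx) (by simpa using hy)

lemma pvAltPowers_eq (n : Int) : pvAltPowers n = pvDigitsI.map (fun d => pvPow d n) := by
  have h : PySem.List.pyRange 0 10 1 = [0,1,2,3,4,5,6,7,8,9] := by decide
  unfold pvAltPowers
  rw [h]
  rfl

-- one level of B's dp: for p in powers: new = merge(new, [s + p for s in sums])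
lemma pv_level_mem (sums : List Int) (z : Int) :
    ∀ (ps acc : List Int),
      z ∈ ps.foldl (fun new p => pvMerge new (sums.map (fun s => s + p))) acc ↔
        z ∈ acc ∨ ∃ p ∈ ps, ∃ s ∈ sums, z = s + p := by
  intro ps
  induction ps with
  | nil => intro acc; simp
  | cons p ps ih =>
    intro acc
    simp only [List.foldl]
    rw [ih, pv_merge_mem]
    constructor
    · rintro ((h | h) | ⟨q, hq, s, hs, rfl⟩)
      · exact Or.inl h
      · obtain ⟨s, hs, rfl⟩ := List.mem_map.1 h
        exact Or.inr ⟨p, by simp, s, hs, rfl⟩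
      · exact Or.inr ⟨q, by simp [hq], s, hs, rfl⟩
    · rintro (h | ⟨q, hq, s, hs, rfl⟩)
      · exact Or.inl (Or.inl h)
      · rcases List.mem_cons.1 hq with rfl | hq
        · exact Or.inl (Or.inr (List.mem_map.2 ⟨s, hs, rfl⟩))
        · exact Or.inr ⟨q, hq, s, hs, rfl⟩

lemma pv_level_pairwise (sums : List Int) (hs : sums.Pairwise (· < ·)) :
    ∀ (ps acc : List Int), acc.Pairwise (· < ·) →
      (ps.foldl (fun new p => pvMerge new (sums.map (fun s => s + p))) acc).Pairwise (· < ·) := by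
  intro ps
  induction ps with
  | nil => intro acc h; simpa using h
  | cons p ps ih =>
    intro acc h
    simp only [List.foldl]
    refine ih _ (pv_merge_pairwise _ _ h ?_)
    rw [List.pairwise_map]
    exact hs.imp (by omega)

-- B's dp list contains exactly the reachable sums, and stays sorted
lemma pv_b_mem (n : Int) (k : Nat) (y : Int) :
    y ∈ (List.range k).foldl
        (fun sums _ =>
          (pvAltPowers n).foldl (fun new p => pvMerge new (sums.map (fun s => s + p))) [])
        [0] ↔
      pvReach n k y := by
  induction k generalizing y with
  | zero => simp [pvReach]
  | succ k ih =>
    rw [List.range_succ, List.foldl_append]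
    simp only [List.foldl]
    rw [pv_level_mem]
    show _ ↔ ∃ t, pvReach n k t ∧ ∃ d ∈ pvDigitsI, y = t + pvPow d n
    rw [pvAltPowers_eq]
    constructor
    · rintro (h | ⟨p, hp, s, hs, rfl⟩)
      · simp at h
      · obtain ⟨d, hd, rfl⟩ := List.mem_map.1 hp
        exact ⟨s, (ih s).1 hs, d, hd, rfl⟩
    · rintro ⟨t, ht, d, hd, rfl⟩
      exact Or.inr ⟨pvPow d n, List.mem_map.2 ⟨d, hd, rfl⟩, t, (ih t).2 ht, rfl⟩

lemma pv_b_pairwise (n : Int) (k : Nat) :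
    ((List.range k).foldl
        (fun sums _ =>
          (pvAltPowers n).foldl (fun new p => pvMerge new (sums.map (fun s => s + p))) [])
        [0]).Pairwise (· < ·) := by
  induction k with
  | zero => simp
  | succ k ih =>
    rw [List.range_succ, List.foldl_append]
    simp only [List.foldl]
    exact pv_level_pairwise _ ih _ _ (by simp)

-- every combination's power sum is reachable
lemma pv_a_reach (n : Int) :
    ∀ (L : List String), (∀ x ∈ L, x ∈ pvPool) →
      pvReach n L.length (pvDigitPowerSum (pvDigitPowers n) L) := by
  intro L
  induction L with
  | nil => intro _; simp [pvDigitPowerSum, pvReach]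
  | cons s L ih =>
    intro h
    obtain ⟨d, hd, hval⟩ := pv_pool_val n s (h s (by simp))
    have hrec := ih (fun x hx => h x (List.mem_cons_of_mem _ hx))
    show pvReach n (L.length + 1) _
    refine ⟨pvDigitPowerSum (pvDigitPowers n) L, hrec, d, hd, ?_⟩
    simp [pvDigitPowerSum, hval, add_comm]

lemma pv_reach_list (n : Int) :
    ∀ (k : Nat) (y : Int), pvReach n k y ↔
      ∃ dl : List Int, dl.length = k ∧ (∀ d ∈ dl, d ∈ pvDigitsI) ∧
        (dl.map (fun d => pvPow d n)).sum = y := by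
  intro k
  induction k with
  | zero =>
    intro y
    constructor
    · rintro rfl; exact ⟨[], rfl, by simp, by simp⟩
    · rintro ⟨dl, hlen, _, hsum⟩
      rw [List.length_eq_zero_iff] at hlen
      subst hlen; simpa [pvReach] using hsum.symm
  | succ k ih =>
    intro y
    constructor
    · rintro ⟨t, ht, d, hd, rfl⟩
      obtain ⟨dl, hlen, hmem, hsum⟩ := (ih t).1 ht
      refine ⟨d :: dl, by simp [hlen], ?_, ?_⟩
      · intro x hx; rcases List.mem_cons.1 hx with rfl | hx
        · exact hd
        · exact hmem x hx
      · simp [hsum, add_comm]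
    · rintro ⟨dl, hlen, hmem, hsum⟩
      cases dl with
      | nil => simp at hlen
      | cons d dl =>
        refine ⟨(dl.map (fun d => pvPow d n)).sum, ?_, d, hmem d (by simp), ?_⟩
        · exact (ih _).2 ⟨dl, by simpa using hlen, fun x hx => hmem x (by simp [hx]), rfl⟩
        · simp at hsum; omega

lemma pv_count_len :
    ∀ (dl : List Int), (∀ d ∈ dl, d ∈ pvDigitsI) →
      (pvPairs.map (fun p => dl.count p.2)).sum = dl.length := by
  intro dl
  induction dl with
  | nil => intro _; decide
  | cons x xs ih =>
    intro h
    have hx : x ∈ pvDigitsI := h x (by simp)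
    have ih' := ih (fun d hd => h d (by simp [hd]))
    simp only [List.count_cons, pvPairs, List.map, List.sum_cons, List.sum_nil, List.length_cons] at *
    fin_cases hx <;> simp_all <;> omega

lemma pv_count_sum (g : Int → Int) :
    ∀ (dl : List Int), (∀ d ∈ dl, d ∈ pvDigitsI) →
      (pvPairs.map (fun p => (dl.count p.2 : Int) * g p.2)).sum = (dl.map g).sum := by
  intro dl
  induction dl with
  | nil => intro _; simp [pvPairs]
  | cons x xs ih =>
    intro h
    have hx : x ∈ pvDigitsI := h x (by simp)
    have ih' := ih (fun d hd => h d (by simp [hd]))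
    simp only [List.count_cons, pvPairs, List.map, List.sum_cons, List.sum_nil] at *
    fin_cases hx <;> · norm_num; linear_combination ih'

lemma pv_flat_rep_mem :
    ∀ (ps : List (String × Int)) (cnt : Int → Nat),
      (ps.flatMap fun p => List.replicate (cnt p.2) p.1) ∈
        pvCWR (ps.map (·.1)) ((ps.map fun p => cnt p.2).sum) := by
  intro ps
  induction ps with
  | nil => intro cnt; simp [pvCWR]
  | cons p ps ih =>
    intro cnt
    simp only [List.flatMap_cons, List.map_cons, List.sum_cons]
    exact pvCWR_rep p.1 _ _ _ _ (ih cnt)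

-- every reachable sum is some combination's power sum
lemma pv_reach_a (n : Int) (k : Nat) (y : Int) (h : pvReach n k y) :
    ∃ L ∈ pvCWR pvPool k, pvDigitPowerSum (pvDigitPowers n) L = y := by
  obtain ⟨dl, hlen, hmem, hsum⟩ := (pv_reach_list n k y).1 h
  refine ⟨pvPairs.flatMap fun p => List.replicate (dl.count p.2) p.1, ?_, ?_⟩
  · have h1 := pv_flat_rep_mem pvPairs (fun d => dl.count d)
    have h2 : pvPairs.map (·.1) = pvPool := by decide
    have h3 := pv_count_len dl hmem
    rw [h2] at h1
    rw [h3, hlen] at h1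
    exact h1
  · unfold pvDigitPowerSum
    have key : (List.map (fun s => (pvDigitPowers n).getD s 0)
        (pvPairs.flatMap fun p => List.replicate (dl.count p.2) p.1)).sum
        = (pvPairs.map fun p => (dl.count p.2 : Int) * pvPow p.2 n).sum := by
      rw [List.map_flatMap, List.flatMap_def, List.sum_flatten, List.map_map]
      refine congrArg List.sum (List.map_congr_left ?_)
      intro p hp
      simp only [Function.comp]
      rw [List.map_replicate, List.sum_replicate, pvGetDDigit n p.1 p.2 (by simpa using hp)]
      simp
    rw [key]
    exact (pv_count_sum (fun d => pvPow d n) dl hmem).trans hsum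

-- Nat.toDigits plumbing
lemma pv_tdc_acc :
    ∀ (f m : Nat) (acc : List Char),
      Nat.toDigitsCore 10 f m acc = Nat.toDigitsCore 10 f m [] ++ acc := by
  intro f
  induction f with
  | zero => intro m acc; simp [Nat.toDigitsCore]
  | succ f ih =>
    intro m acc
    simp only [Nat.toDigitsCore]
    by_cases h : m / 10 = 0
    · simp [h]
    · rw [if_neg h, if_neg h, ih (m/10) (Nat.digitChar (m % 10) :: acc),
          ih (m/10) [Nat.digitChar (m % 10)], List.append_assoc]
      rfl

lemma pv_tdc_fuel :
    ∀ (m : Nat), ∀ (f g : Nat), m < f → m < g → ∀ (acc : List Char),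
      Nat.toDigitsCore 10 f m acc = Nat.toDigitsCore 10 g m acc := by
  intro m
  induction m using Nat.strong_induction_on with
  | _ m ih =>
    intro f g hf hg acc
    cases f with
    | zero => omega
    | succ f =>
      cases g with
      | zero => omega
      | succ g =>
        simp only [Nat.toDigitsCore]
        by_cases h : m / 10 = 0
        · simp [h]
        · rw [if_neg h, if_neg h]
          have hdiv : m / 10 < m := Nat.div_lt_self (by omega) (by norm_num)
          exact ih (m/10) hdiv f g (by omega) (by omega) _

lemma pv_toDigits_small (m : Nat) (h : m < 10) : Nat.toDigits 10 m = [Nat.digitChar m] := by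
  have h0 : m / 10 = 0 := Nat.div_eq_of_lt h
  have h1 : m % 10 = m := Nat.mod_eq_of_lt h
  simp [Nat.toDigits, Nat.toDigitsCore, h0, h1]

lemma pv_toDigits_split (m : Nat) (h : 10 ≤ m) :
    Nat.toDigits 10 m = Nat.toDigits 10 (m / 10) ++ [Nat.digitChar (m % 10)] := by
  have h0 : m / 10 ≠ 0 := by
    intro hc
    have := Nat.div_eq_of_lt (show m < 10 by omega)
    omega
  have hdiv : m / 10 < m := Nat.div_lt_self (by omega) (by norm_num)
  show Nat.toDigitsCore 10 (m + 1) m [] = _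
  rw [Nat.toDigitsCore, if_neg h0, pv_tdc_acc,
      pv_tdc_fuel (m/10) m (m/10 + 1) (by omega) (by omega)]
  rfl

-- A's dict-over-str(a) digit power sum agrees with B's arithmetic one (for m ≥ 1)
lemma pv_dps_str (n : Int) :
    ∀ (m : Nat), 1 ≤ m →
      pvDigitPowerSum (pvDigitPowers n) (pvStrChars (PySem.Int.toStr (m : Int))) = pvAltDigitPowerSum n m := by
  have hchars : ∀ (m : Nat), pvStrChars (PySem.Int.toStr (m : Int)) =
      (Nat.toDigits 10 m).map (fun c => String.ofList [c]) := by
    intro m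
    unfold pvStrChars
    rw [PySem.Int.toList_toStr]
    have hneg : ¬ ((m:Int) < 0) := by omega
    simp [PySem.Int.toChars, hneg]
  intro m
  induction m using Nat.strong_induction_on with
  | _ m ih =>
    intro hm
    rw [hchars m]
    by_cases h10 : m < 10
    · rw [pv_toDigits_small m h10]
      unfold pvDigitPowerSum
      simp only [List.map_cons, List.map_nil, List.sum_cons, List.sum_nil]
      rw [pv_lookup_digitChar n m h10]
      rw [pvAltDigitPowerSum, dif_neg (by omega : ¬ m = 0)]
      rw [pvAltDigitPowerSum, dif_pos (Nat.div_eq_of_lt h10)]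
      simp [pvPow, Nat.mod_eq_of_lt h10]
    · rw [pv_toDigits_split m (by omega)]
      unfold pvDigitPowerSum
      simp only [List.map_append, List.map_map, List.sum_append, List.map_cons, List.map_nil,
        List.sum_cons, List.sum_nil]
      have hdiv : m / 10 < m := Nat.div_lt_self (by omega) (by norm_num)
      have hdiv1 : 1 ≤ m / 10 := (Nat.one_le_div_iff (by norm_num)).2 (by omega)
      have ihm := ih (m/10) hdiv hdiv1
      rw [hchars (m/10)] at ihm
      unfold pvDigitPowerSum at ihm
      simp only [List.map_map] at ihm
      rw [ihm, pv_lookup_digitChar n (m % 10) (Nat.mod_lt m (by norm_num))]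
      conv_rhs => rw [pvAltDigitPowerSum]
      rw [dif_neg (by omega : ¬ m = 0)]
      simp only [pvPow]
      ring

-- B's final accumulation is the sum of the filtered list
lemma pv_foldl_sum_if (C : Int → Prop) [DecidablePred C] :
    ∀ (l : List Int) (init : Int),
      l.foldl (fun t a => if C a then t + a else t) init =
        init + (l.filter (fun a => decide (C a))).sum := by
  intro l
  induction l with
  | nil => intro init; simp
  | cons a l ih =>
    intro init
    simp only [List.foldl, List.filter_cons]
    by_cases hC : C a
    · rw [if_pos hC, ih]
      simp [hC, add_assoc]
    · rw [if_neg hC, ih]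
      simp [hC]

-- the membership characterisation shared by both final collections
lemma pv_values_iff (n : Int) (k : Nat) (y : Int) :
    (∃ L ∈ pvCWR pvPool k,
        (pvDigitPowerSum (pvDigitPowers n) L = pvDigitPowerSum (pvDigitPowers n) (pvStrChars (PySem.Int.toStr (pvDigitPowerSum (pvDigitPowers n) L)))
          ∧ 10 ≤ pvDigitPowerSum (pvDigitPowers n) L) ∧ y = pvDigitPowerSum (pvDigitPowers n) L) ↔
      pvReach n k y ∧ (10 ≤ y ∧ y = pvAltDigitPowerSum n y.toNat) := by
  constructor
  · rintro ⟨L, hL, ⟨heq, h10⟩, rfl⟩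
    obtain ⟨hlen, hmem⟩ := pvCWR_mem_shape pvPool k L hL
    set y := pvDigitPowerSum (pvDigitPowers n) L with hy
    have hreach : pvReach n k y := by
      have := pv_a_reach n L hmem
      rwa [hlen] at this
    refine ⟨hreach, h10, ?_⟩
    have hnat : ((y.toNat : Int)) = y := Int.toNat_of_nonneg (by omega)
    have := pv_dps_str n y.toNat (by omega)
    rw [hnat] at this
    rw [← this]
    exact heq
  · rintro ⟨hreach, h10, heq⟩
    obtain ⟨L, hL, hdps⟩ := pv_reach_a n k y hreach
    refine ⟨L, hL, ⟨?_, by omega⟩, hdps.symm⟩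
    rw [hdps]
    have hnat : ((y.toNat : Int)) = y := Int.toNat_of_nonneg (by omega)
    have := pv_dps_str n y.toNat (by omega)
    rw [hnat] at this
    rw [this, ← heq]

-- ===== VERDICT (by name: the statement is the Claim_ definition above) =====
theorem problem_30_spec : Claim_equal_problem_30 := by
  intro n _hdom _hpre
  unfold Spec_problem_30
  show problem_30 n = problem_30_alt n
  unfold problem_30 problem_30_alt
  set k := pvFindK n with hk
  set C : List String → Prop := fun L =>
    pvDigitPowerSum (pvDigitPowers n) L =
        pvDigitPowerSum (pvDigitPowers n) (pvStrChars (PySem.Int.toStr (pvDigitPowerSum (pvDigitPowers n) L)))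
      ∧ 10 ≤ pvDigitPowerSum (pvDigitPowers n) L with hC
  set F : Int → Prop := fun a => 10 ≤ a ∧ a = pvAltDigitPowerSum n a.toNat with hF
  set SB := (List.range k).foldl
      (fun sums _ =>
        (pvAltPowers n).foldl (fun new p => pvMerge new (sums.map (fun s => s + p))) [])
      [0] with hSB
  set VA := (pvCWR pvPool k).foldl
      (fun vs L => if C L then PySem.Set.add vs (pvDigitPowerSum (pvDigitPowers n) L) else vs)
      PySem.Set.empty with hVA
  show VA.sum = SB.foldl (fun t a => if F a then t + a else t) 0
  rw [pv_foldl_sum_if F SB 0, zero_add]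
  have hmemVA : ∀ y, y ∈ VA ↔ pvReach n k y ∧ F y := by
    intro y
    rw [hVA, pv_mem_foldl_if (pvCWR pvPool k) C
          (fun L => pvDigitPowerSum (pvDigitPowers n) L) PySem.Set.empty y]
    have hempty : y ∈ (PySem.Set.empty : PySem.Set Int) ↔ False := by
      simp [PySem.Set.empty]
    rw [hempty, false_or]
    exact pv_values_iff n k y
  have hmemF : ∀ y, y ∈ SB.filter (fun a => decide (F a)) ↔ pvReach n k y ∧ F y := by
    intro y
    rw [List.mem_filter]
    rw [show ((fun a => decide (F a)) y = true) ↔ F y by simp]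
    rw [hSB, pv_b_mem]
  have hnodupVA : VA.Nodup := by
    rw [hVA]
    exact pv_nodup_foldl_if _ C _ PySem.Set.empty (by simp [PySem.Set.empty])
  have hnodupF : (SB.filter (fun a => decide (F a))).Nodup :=
    ((pv_b_pairwise n k).nodup).filter _
  have hperm : VA.Perm (SB.filter (fun a => decide (F a))) := by
    rw [List.perm_ext_iff_of_nodup hnodupVA hnodupF]
    intro y
    rw [hmemVA y, hmemF y]
  exact hperm.sum_eq
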